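-- pv_equiv track=rewrite | github.com/ylemkimon/hml-equation-parser | hml_equation_parser/EqRegularizer.py | matchCurlyBraces
-- ===== SOURCE A (Python) =====
-- from typing import Dict, Tuple, List
--
-- def matchCurlyBraces (strList: List[str]) -> List[str]:
--     '''
--     Match curly braces if they don't.
--
--     Parameters
--     ----------------------
--     strList : List[str]
--         List of strings, splitted by whitespace from hml equation string.
--
--     Returns
--     ----------------------
--     out : List[str]
--         Curly bracket matched string list.
--     '''
--     isMatched = 0
--     for idx, elem in enumerate(strList):
--         if elem == "{":
--             isMatched = isMatched + 1
--         elif elem == "}":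
--             isMatched = isMatched - 1
--
--     if isMatched > 0:
--         while isMatched > 0:
--             strList.insert(idx+1, "}")
--             isMatched = isMatched - 1
--
--
--     isMatched = 0
--     for idx, elem in reversed(list(enumerate(strList))):
--         if elem == "}":
--             isMatched = isMatched + 1
--         elif elem == "{":
--             isMatched = isMatched - 1
--
--     if isMatched > 0:
--         while isMatched > 0:
--             strList.insert(idx, "{")
--             isMatched = isMatched - 1
--
--     return strList
-- ===== SOURCE B (Python) =====
-- def matchCurlyBraces(strList):
--     '''
--     Match curly braces if they don't.
--
--     Single pass: compute net = (#'{') - (#'}') once, then either append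
--     net closing braces or prepend -net opening braces (in place).
--     '''
--     net = 0
--     for elem in strList:
--         if elem == "{":
--             net = net + 1
--         elif elem == "}":
--             net = net - 1
--     if net > 0:
--         strList.extend(["}"] * net)
--     elif net < 0:
--         strList[:0] = ["{"] * (-net)
--     return strList
-- ===== Notes on version B (the rewrite author's own statement) =====
-- stated objective: simpler
-- what changed: Replaces A's two enumerate passes (forward for excess '{', reversed for excess '}') with repeated list.insert at a remembered index by one counting pass over the list followed by a single bulk append/prepend of the missing braces.
import Mathlib
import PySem

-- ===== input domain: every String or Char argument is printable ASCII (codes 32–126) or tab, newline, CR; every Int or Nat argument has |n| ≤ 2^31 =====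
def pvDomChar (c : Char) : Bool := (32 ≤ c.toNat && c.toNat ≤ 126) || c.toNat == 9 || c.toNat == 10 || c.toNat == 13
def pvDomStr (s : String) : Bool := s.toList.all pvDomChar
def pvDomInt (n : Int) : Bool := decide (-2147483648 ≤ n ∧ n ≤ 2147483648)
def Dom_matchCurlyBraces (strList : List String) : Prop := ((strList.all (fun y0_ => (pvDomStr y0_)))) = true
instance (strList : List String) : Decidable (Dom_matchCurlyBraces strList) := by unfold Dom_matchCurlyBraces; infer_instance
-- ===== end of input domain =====

-- B balances the braces by one counting pass plus a single bulk append/prepend instead of A's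
-- two enumerate passes with repeated insert (objective: simpler). Both Pythons mutate strList in
-- place to the same final contents; the theorems are about the returned value.

-- ===== PORT A =====
-- state = (isMatched, idx); Python's idx is unassigned before the loop but is only read when
-- isMatched > 0, which forces a nonempty list (so the initial 0 here is never observed).
def pvStepA (st : Int × Int) (p : Int × String) : Int × Int :=
  if p.2 = "{" then (st.1 + 1, p.1) else if p.2 = "}" then (st.1 - 1, p.1) else (st.1, p.1)

def pvStepB (st : Int × Int) (p : Int × String) : Int × Int :=
  if p.2 = "}" then (st.1 + 1, p.1) else if p.2 = "{" then (st.1 - 1, p.1) else (st.1, p.1)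

-- the 'while isMatched > 0: strList.insert(i, v)' loop, n = initial isMatched
def pvInsLoop (xs : List String) (i : Int) (v : String) : Nat → List String
  | 0 => xs
  | n + 1 => pvInsLoop (PySem.List.insert xs i v) i v n

def matchCurlyBraces (strList : List String) : List String :=
  let s1 := (PySem.List.enumerate strList).foldl pvStepA (0, 0)
  let l1 := if s1.1 > 0 then pvInsLoop strList (s1.2 + 1) "}" s1.1.toNat else strList
  let s2 := (PySem.List.enumerate l1).reverse.foldl pvStepB (0, 0)
  if s2.1 > 0 then pvInsLoop l1 s2.2 "{" s2.1.toNat else l1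

-- ===== PORT B =====
def matchCurlyBraces_alt (strList : List String) : List String :=
  let net := strList.foldl (fun m e => if e = "{" then m + 1 else if e = "}" then m - 1 else m) (0 : Int)
  if net > 0 then strList ++ List.replicate net.toNat "}"
  else if net < 0 then List.replicate (-net).toNat "{" ++ strList
  else strList

-- ===== PRECONDITION & SPEC =====
def Spec_matchCurlyBraces (strList : List String) (out : List String) : Prop := out = matchCurlyBraces_alt strList
instance (strList : List String) (out : List String) : Decidable (Spec_matchCurlyBraces strList out) := by unfold Spec_matchCurlyBraces; infer_instance

-- ===== CLAIM (what is proved, stated in full; the proofs are below) =====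
def Claim_equal_matchCurlyBraces : Prop := ∀ (strList : List String), Dom_matchCurlyBraces strList → Spec_matchCurlyBraces strList (matchCurlyBraces strList)

-- ===== LEMMAS AND PROOFS =====

-- B's counting fold
def pvNet (l : List String) : Int :=
  l.foldl (fun m e => if e = "{" then m + 1 else if e = "}" then m - 1 else m) 0

theorem pvNet_shift (l : List String) (m : Int) :
    l.foldl (fun m e => if e = "{" then m + 1 else if e = "}" then m - 1 else m) m = m + pvNet l := by
  induction l generalizing m with
  | nil => simp [pvNet]
  | cons a t ih =>
      simp only [pvNet, List.foldl_cons]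
      rw [ih, ih (if a = "{" then (0:Int) + 1 else if a = "}" then 0 - 1 else 0)]
      split_ifs <;> ring

theorem pvNet_cons (a : String) (t : List String) :
    pvNet (a :: t) = (if a = "{" then (1:Int) else if a = "}" then -1 else 0) + pvNet t := by
  have h : pvNet (a :: t)
      = t.foldl (fun m e => if e = "{" then m + 1 else if e = "}" then m - 1 else m)
          (if a = "{" then (0:Int) + 1 else if a = "}" then 0 - 1 else 0) := rfl
  rw [h, pvNet_shift]
  split_ifs <;> ring

theorem pvNet_append (a b : List String) : pvNet (a ++ b) = pvNet a + pvNet b := by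
  simp only [pvNet, List.foldl_append]
  rw [pvNet_shift b (List.foldl _ 0 a)]
  rfl

theorem pvNet_replicate_close (n : Nat) : pvNet (List.replicate n "}") = -(n : Int) := by
  induction n with
  | zero => simp [pvNet]
  | succ k ih =>
      rw [List.replicate_succ, pvNet_cons, ih, if_neg (by decide), if_pos rfl]
      push_cast
      ring

theorem pvNet_nil : pvNet [] = 0 := rfl

-- first fold: the count component is the net brace count
theorem foldA_fst (l : List String) (k : Int) (s : Int × Int) :
    ((PySem.List.enumerate l k).foldl pvStepA s).1 = s.1 + pvNet l := by
  induction l generalizing k s with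
  | nil => simp [PySem.List.enumerate_nil, pvNet]
  | cons a t ih =>
      rw [PySem.List.enumerate_cons, List.foldl_cons, ih, pvNet_cons]
      simp only [pvStepA]
      split_ifs <;> ring

-- first fold: the idx component ends at the last index
theorem foldA_snd (l : List String) (k : Int) (s : Int × Int) (h : l ≠ []) :
    ((PySem.List.enumerate l k).foldl pvStepA s).2 = k + l.length - 1 := by
  induction l generalizing k s with
  | nil => exact absurd rfl h
  | cons a t ih =>
      rw [PySem.List.enumerate_cons, List.foldl_cons]
      cases t with
      | nil =>
          simp only [PySem.List.enumerate_nil, List.foldl_nil, pvStepA]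
          split_ifs <;> simp
      | cons b u =>
          rw [ih (k + 1) _ (by simp)]
          simp [List.length_cons]; ring

-- second fold: the count component is minus the net, over any pair list via its snd projections
theorem foldB_fst (ps : List (Int × String)) (s : Int × Int) :
    (ps.foldl pvStepB s).1 = s.1 + ((ps.map (fun p => if p.2 = "}" then (1:Int) else if p.2 = "{" then -1 else 0)).sum) := by
  induction ps generalizing s with
  | nil => simp
  | cons p t ih =>
      rw [List.foldl_cons, ih]
      simp only [List.map_cons, List.sum_cons, pvStepB]
      split_ifs <;> ring

theorem sumB_enumerate (l : List String) (k : Int) :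
    ((PySem.List.enumerate l k).map (fun p => if p.2 = "}" then (1:Int) else if p.2 = "{" then -1 else 0)).sum = -pvNet l := by
  induction l generalizing k with
  | nil => simp [PySem.List.enumerate_nil, pvNet]
  | cons a t ih =>
      rw [PySem.List.enumerate_cons]
      simp only [List.map_cons, List.sum_cons, ih (k + 1)]
      rw [pvNet_cons]
      split_ifs with h1 h2
      · exact absurd (h1 ▸ h2) (by decide)
      · ring
      · ring
      · ring

-- second fold: the idx component ends at the FIRST index (fold over the reversed enumerate)
theorem foldB_snd (l : List String) (a : String) (t : List String) (k : Int) (s : Int × Int)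
    (h : l = a :: t) :
    ((PySem.List.enumerate l k).reverse.foldl pvStepB s).2 = k := by
  subst h
  rw [PySem.List.enumerate_cons, List.reverse_cons, List.foldl_append, List.foldl_cons,
    List.foldl_nil]
  simp only [pvStepB]
  split_ifs <;> rfl

-- inserting at the boundary of xs, n times, appends n copies
theorem insLoop_append (xs : List String) (v : String) (n j : Nat) :
    pvInsLoop (xs ++ List.replicate j v) (xs.length : Int) v n = xs ++ List.replicate (j + n) v := by
  induction n generalizing j with
  | zero => rfl
  | succ m ih =>
      rw [pvInsLoop]
      have hins : PySem.List.insert (xs ++ List.replicate j v) (xs.length : Int) v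
          = xs ++ List.replicate (j + 1) v := by
        rw [PySem.List.insert_natCast _ xs.length v (by simp)]
        simp [List.replicate_succ]
      rw [hins, ih (j + 1)]
      ring_nf

-- inserting at 0, n times, prepends n copies
theorem insLoop_prepend (xs : List String) (v : String) (n : Nat) :
    pvInsLoop xs 0 v n = List.replicate n v ++ xs := by
  induction n generalizing xs with
  | zero => rfl
  | succ m ih =>
      rw [pvInsLoop, PySem.List.insert_zero, ih, List.replicate_succ']
      simp

theorem foldB_rev_fst (l : List String) (k : Int) (s : Int × Int) :
    ((PySem.List.enumerate l k).reverse.foldl pvStepB s).1 = s.1 - pvNet l := by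
  rw [foldB_fst, List.map_reverse, List.sum_reverse, sumB_enumerate]
  ring

theorem ne_nil_of_net_ne_zero (l : List String) (h : pvNet l ≠ 0) : l ≠ [] := by
  intro he; subst he; exact h pvNet_nil

-- ===== VERDICT (by name: the statement is the Claim_ definition above) =====
theorem matchCurlyBraces_spec : Claim_equal_matchCurlyBraces := by
  intro l _
  show matchCurlyBraces l = matchCurlyBraces_alt l
  have hs1 : ((PySem.List.enumerate l).foldl pvStepA ((0 : Int), (0 : Int))).1 = pvNet l := by
    rw [foldA_fst]; ring
  have hnet : l.foldl (fun m e => if e = "{" then m + 1 else if e = "}" then m - 1 else m) (0:Int) = pvNet l := rfl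
  unfold matchCurlyBraces matchCurlyBraces_alt
  simp only [hs1, hnet]
  by_cases hpos : pvNet l > 0
  · -- excess '{': A appends via the first while-loop, second pass is a no-op
    have hne : l ≠ [] := ne_nil_of_net_ne_zero l (by omega)
    rw [if_pos hpos, if_pos hpos]
    rw [foldA_snd l 0 ((0 : Int), (0 : Int)) hne]
    have hidx : (0 : Int) + l.length - 1 + 1 = (l.length : Int) := by ring
    rw [hidx]
    have h1 : pvInsLoop l (l.length : Int) "}" (pvNet l).toNat
        = l ++ List.replicate (pvNet l).toNat "}" := by
      have := insLoop_append l "}" (pvNet l).toNat 0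
      simpa using this
    rw [h1, foldB_rev_fst]
    have hnet1 : pvNet (l ++ List.replicate (pvNet l).toNat "}") = 0 := by
      rw [pvNet_append, pvNet_replicate_close]
      omega
    rw [hnet1]
    norm_num
  · rw [if_neg hpos, if_neg hpos]
    rw [foldB_rev_fst]
    by_cases hneg : pvNet l < 0
    · -- excess '}': A prepends via the second while-loop at idx 0
      have hne : l ≠ [] := ne_nil_of_net_ne_zero l (by omega)
      obtain ⟨a, t, he⟩ := List.exists_cons_of_ne_nil hne
      rw [if_pos (by omega), if_pos hneg]
      rw [foldB_snd l a t 0 ((0 : Int), (0 : Int)) he]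
      have h2 : ((0 : Int), (0 : Int)).1 - pvNet l = -pvNet l := by ring
      rw [h2, insLoop_prepend]
    · rw [if_neg (by omega), if_neg hneg]
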